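-- pv_equiv track=rewrite | github.com/jerrychen52/LeetCode | PalindromeRemoval.py | palindromeRemoval
-- ===== SOURCE A (Python) =====
-- from typing import List
--
-- def palindromeRemoval(arr:List[int])->int:
--     n = len(arr)
--     dp = []
--     for i in range(n):
--         dp.append([n]*n)
--
--     for l in range(1,n+1,1):
--         for i in range(n):
--             for j in range(i+l-1,n,1):
--                 if (i == j):
--                     dp[i][j] = 1
--                     continue
--                 dp[i][j] = 1+dp[i+1][j] # can always delete current element
--                 if (arr[i] == arr[i+1]):
--                     dp[i][j] = min(dp[i][j],1+dp[i+2][j])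
--                 if (arr[i] == arr[j] and j>i+1):
--                     dp[i][j] = min(dp[i][j], dp[i+1][j-1]) #
--                 for k in range(i+2,j,1):
--                     if (arr[i] == arr[k]):
--                         dp[i][j] = min(dp[i][j], dp[i+1][k-1]+dp[k+1][j])
--
--     return dp[0][n-1]
-- ===== SOURCE B (Python) =====
-- from typing import List
--
-- def palindromeRemoval(arr: List[int]) -> int:
--     # Top-down memoized recursion: each interval (i, j) is solved once, on demand.
--     n = len(arr)
--     memo = {}
--     def solve(i: int, j: int) -> int:
--         if i == j:
--             return 1
--         key = (i, j)
--         if key in memo: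
--             return memo[key]
--         best = 1 + solve(i + 1, j)
--         if j > i + 1 and arr[i] == arr[i + 1]:
--             best = min(best, 1 + solve(i + 2, j))
--         if j > i + 1 and arr[i] == arr[j]:
--             best = min(best, solve(i + 1, j - 1))
--         for k in range(i + 2, j):
--             if arr[i] == arr[k]:
--                 best = min(best, solve(i + 1, k - 1) + solve(k + 1, j))
--         memo[key] = best
--         return best
--     return solve(0, n - 1)
-- ===== Notes on version B (the rewrite author's own statement) =====
-- stated objective: faster
-- what changed: A fills an n*n table bottom-up with n full relaxation passes over all cells (an O(n^4) quadruple loop); B has no table passes at all: it is a top-down memoized recursion that solves each interval (i,j) exactly once, on demand, in O(n^3).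
import Mathlib
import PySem

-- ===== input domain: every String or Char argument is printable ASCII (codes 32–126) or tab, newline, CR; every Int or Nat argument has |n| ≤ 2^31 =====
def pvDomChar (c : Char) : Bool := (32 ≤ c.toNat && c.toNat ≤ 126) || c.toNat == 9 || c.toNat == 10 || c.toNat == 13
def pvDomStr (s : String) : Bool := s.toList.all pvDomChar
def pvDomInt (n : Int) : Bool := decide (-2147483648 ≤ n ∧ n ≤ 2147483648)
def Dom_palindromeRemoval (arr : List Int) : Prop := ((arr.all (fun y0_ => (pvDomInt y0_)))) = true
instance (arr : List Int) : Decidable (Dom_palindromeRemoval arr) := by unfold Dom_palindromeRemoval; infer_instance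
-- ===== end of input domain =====

-- B replaces A's O(n^4) bottom-up table passes by a top-down memoized recursion that
-- solves each interval once on demand (O(n^3)), an asymptotic speed-up.

-- shared helper: arr[i] (every executed read is in range; default never observed inside Pre_)
def pvGetI (arr : List Int) (i : Nat) : Int := arr.getD i 0

-- ===== PORT A =====
-- dp[i][j] read; out-of-range reads (which raise IndexError in Python) return the
-- default 0 — they occur only outside Pre_palindromeRemoval.
def pvGet2 (dp : List (List Int)) (i j : Nat) : Int := (dp.getD i []).getD j 0
-- dp[i][j] = v
def pvSet2 (dp : List (List Int)) (i j : Nat) (v : Int) : List (List Int) :=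
  dp.modify i (fun r => r.set j v)

-- literal transliteration of A; Python ranges have step 1 and non-negative bounds,
-- ported exactly as List.range / List.range'.
def palindromeRemoval (arr : List Int) : Int :=
  let n := arr.length
  -- dp = []; for i in range(n): dp.append([n]*n)
  let dp : List (List Int) := (List.range n).foldl (fun dp _ => dp ++ [List.replicate n (n : Int)]) []
  let dp := (List.range' 1 n).foldl (fun dp l =>      -- for l in range(1, n+1)
    (List.range n).foldl (fun dp i =>                 -- for i in range(n)
      (List.range' (i+l-1) (n - (i+l-1))).foldl (fun dp j =>   -- for j in range(i+l-1, n)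
        if i = j then pvSet2 dp i j 1                 -- dp[i][j] = 1; continue
        else
          let dp := pvSet2 dp i j (1 + pvGet2 dp (i+1) j)
          let dp := if pvGetI arr i = pvGetI arr (i+1) then
              pvSet2 dp i j (min (pvGet2 dp i j) (1 + pvGet2 dp (i+2) j)) else dp
          let dp := if pvGetI arr i = pvGetI arr j ∧ i+1 < j then
              pvSet2 dp i j (min (pvGet2 dp i j) (pvGet2 dp (i+1) (j-1))) else dp
          (List.range' (i+2) (j - (i+2))).foldl (fun dp k =>   -- for k in range(i+2, j)
            if pvGetI arr i = pvGetI arr k then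
              pvSet2 dp i j (min (pvGet2 dp i j) (pvGet2 dp (i+1) (k-1) + pvGet2 dp (k+1) j))
            else dp) dp) dp) dp) dp
  pvGet2 dp 0 (n-1)                                   -- return dp[0][n-1]

-- ===== PORT B =====
-- literal transliteration of B's inner 'solve', threading the memo dict through the
-- recursion; the fuel argument only bounds the recursion depth (any fuel > j - i gives
-- Python's value; fuel 0 is never reached on the call palindromeRemoval_alt makes
-- inside Pre_).
def pvSolve (arr : List Int) : Nat → PySem.Dict (Int × Int) Int → Nat → Nat →
    Int × PySem.Dict (Int × Int) Int
  | 0, d, _, _ => (0, d)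
  | f+1, d, i, j =>
    if i = j then (1, d)                              -- if i == j: return 1
    else
      match d.get? ((i : Int), (j : Int)) with        -- if key in memo: return memo[key]
      | some v => (v, d)
      | none =>
        let r1 := pvSolve arr f d (i+1) j             -- best = 1 + solve(i+1, j)
        let best := 1 + r1.1
        let r2 := if i+1 < j ∧ pvGetI arr i = pvGetI arr (i+1) then
            let s := pvSolve arr f r1.2 (i+2) j
            (min best (1 + s.1), s.2)
          else (best, r1.2)
        let r3 := if i+1 < j ∧ pvGetI arr i = pvGetI arr j then
            let s := pvSolve arr f r2.2 (i+1) (j-1)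
            (min r2.1 s.1, s.2)
          else r2
        let r4 := (List.range' (i+2) (j - (i+2))).foldl   -- for k in range(i+2, j)
          (fun (p : Int × PySem.Dict (Int × Int) Int) k =>
            if pvGetI arr i = pvGetI arr k then
              let sa := pvSolve arr f p.2 (i+1) (k-1)
              let sb := pvSolve arr f sa.2 (k+1) j
              (min p.1 (sa.1 + sb.1), sb.2)
            else p) r3
        (r4.1, r4.2.insert ((i : Int), (j : Int)) r4.1)   -- memo[key] = best; return best

def palindromeRemoval_alt (arr : List Int) : Int :=
  let n := arr.length
  (pvSolve arr n PySem.Dict.empty 0 (n-1)).1          -- return solve(0, n-1)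

-- ===== PRECONDITION & SPEC =====
-- Pre_ excludes exactly the inputs where A raises IndexError: the empty list, and
-- lists whose last two elements are equal (there A reads dp[n][n-1]).
def Pre_palindromeRemoval (arr : List Int) : Prop :=
  arr ≠ [] ∧ (arr.length < 2 ∨ arr.getD (arr.length - 2) 0 ≠ arr.getD (arr.length - 1) 0)
instance (arr : List Int) : Decidable (Pre_palindromeRemoval arr) := by
  unfold Pre_palindromeRemoval; infer_instance

def pvWitness_palindromeRemoval : List Int := [1, 2, 1, 3]

def Spec_palindromeRemoval (arr : List Int) (out : Int) : Prop := out = palindromeRemoval_alt arr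
instance (arr : List Int) (out : Int) : Decidable (Spec_palindromeRemoval arr out) := by
  unfold Spec_palindromeRemoval; infer_instance

-- ===== CLAIM (what is proved, stated in full; the proofs are below) =====
def Claim_equal_palindromeRemoval : Prop :=
  ∀ (arr : List Int), Dom_palindromeRemoval arr → Pre_palindromeRemoval arr →
    Spec_palindromeRemoval arr (palindromeRemoval arr)

-- ===== LEMMAS AND PROOFS =====

-- The common specification value: pvF fuel i j is the interval-DP recurrence both
-- programs converge to, computed with structural fuel (any fuel > j - i agrees).
def pvF (arr : List Int) : Nat → Nat → Nat → Int
  | 0, _, _ => 0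
  | fuel+1, i, j =>
    if i = j then 1
    else
      let m := 1 + pvF arr fuel (i+1) j
      let m := if i+1 < j ∧ pvGetI arr i = pvGetI arr (i+1) then min m (1 + pvF arr fuel (i+2) j) else m
      let m := if i+1 < j ∧ pvGetI arr i = pvGetI arr j then min m (pvF arr fuel (i+1) (j-1)) else m
      (List.range' (i+2) (j - (i+2))).foldl (fun b k =>
        if pvGetI arr i = pvGetI arr k then min b (pvF arr fuel (i+1) (k-1) + pvF arr fuel (k+1) j) else b) m

def pvFc (arr : List Int) (i j : Nat) : Int := pvF arr (j+1) i j

theorem pvF_fuel (arr : List Int) :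
    ∀ d i j f f', j - i ≤ d → i ≤ j → j < i + f → j < i + f' →
      pvF arr f i j = pvF arr f' i j := by
  intro d
  induction d with
  | zero =>
    intro i j f f' hd hij hf hf'
    have hij' : i = j := by omega
    subst hij'
    cases f with
    | zero => omega
    | succ f =>
      cases f' with
      | zero => omega
      | succ f' => simp [pvF]
  | succ d ih =>
    intro i j f f' hd hij hf hf'
    cases f with
    | zero => omega
    | succ f =>
      cases f' with
      | zero => omega
      | succ f' =>
        by_cases h : i = j
        · subst h; simp [pvF]
        · have hij' : i < j := by omega
          have e1 : pvF arr f (i+1) j = pvF arr f' (i+1) j :=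
            ih (i+1) j f f' (by omega) (by omega) (by omega) (by omega)
          have hfold : ∀ m : Int,
              (List.range' (i+2) (j - (i+2))).foldl (fun b k =>
                if pvGetI arr i = pvGetI arr k then min b (pvF arr f (i+1) (k-1) + pvF arr f (k+1) j) else b) m
            = (List.range' (i+2) (j - (i+2))).foldl (fun b k =>
                if pvGetI arr i = pvGetI arr k then min b (pvF arr f' (i+1) (k-1) + pvF arr f' (k+1) j) else b) m := by
            intro m
            apply PySem.List.foldl_congr_mem
            intro b k hk
            rw [List.mem_range'_1] at hk
            have hk1 : i + 2 ≤ k := hk.1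
            have hk2 : k < j := by omega
            rw [ih (i+1) (k-1) f f' (by omega) (by omega) (by omega) (by omega),
                ih (k+1) j f f' (by omega) (by omega) (by omega) (by omega)]
          by_cases hg : i + 1 < j
          · have e2 : pvF arr f (i+2) j = pvF arr f' (i+2) j :=
              ih (i+2) j f f' (by omega) (by omega) (by omega) (by omega)
            have e3 : pvF arr f (i+1) (j-1) = pvF arr f' (i+1) (j-1) :=
              ih (i+1) (j-1) f f' (by omega) (by omega) (by omega) (by omega)
            simp only [pvF, if_neg h, e1, e2, e3, hfold]
          · have hr : j - (i+2) = 0 := by omega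
            simp only [pvF, if_neg h, e1, hr, List.range'_zero, List.foldl_nil,
              hg, false_and, if_false]

theorem pvFc_eq (arr : List Int) (i j : Nat) (hij : i < j) :
    pvFc arr i j =
      (let m := 1 + pvFc arr (i+1) j
       let m := if i+1 < j ∧ pvGetI arr i = pvGetI arr (i+1) then min m (1 + pvFc arr (i+2) j) else m
       let m := if i+1 < j ∧ pvGetI arr i = pvGetI arr j then min m (pvFc arr (i+1) (j-1)) else m
       (List.range' (i+2) (j - (i+2))).foldl (fun b k =>
         if pvGetI arr i = pvGetI arr k then min b (pvFc arr (i+1) (k-1) + pvFc arr (k+1) j) else b) m) := by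
  have h : ¬ i = j := by omega
  have e1 : pvF arr j (i+1) j = pvFc arr (i+1) j :=
    pvF_fuel arr j (i+1) j j (j+1) (by omega) (by omega) (by omega) (by omega)
  have hfold : ∀ m : Int,
      (List.range' (i+2) (j - (i+2))).foldl (fun b k =>
        if pvGetI arr i = pvGetI arr k then min b (pvF arr j (i+1) (k-1) + pvF arr j (k+1) j) else b) m
    = (List.range' (i+2) (j - (i+2))).foldl (fun b k =>
        if pvGetI arr i = pvGetI arr k then min b (pvFc arr (i+1) (k-1) + pvFc arr (k+1) j) else b) m := by
    intro m
    apply PySem.List.foldl_congr_mem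
    intro b k hk
    rw [List.mem_range'_1] at hk
    have hk1 : i + 2 ≤ k := hk.1
    have hk2 : k < j := by omega
    rw [pvF_fuel arr j (i+1) (k-1) j ((k-1)+1) (by omega) (by omega) (by omega) (by omega),
        pvF_fuel arr j (k+1) j j (j+1) (by omega) (by omega) (by omega) (by omega)]
    rfl
  by_cases hg : i + 1 < j
  · have e2 : pvF arr j (i+2) j = pvFc arr (i+2) j :=
      pvF_fuel arr j (i+2) j j (j+1) (by omega) (by omega) (by omega) (by omega)
    have e3 : pvF arr j (i+1) (j-1) = pvFc arr (i+1) (j-1) := by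
      have hj : j - 1 + 1 = j := by omega
      unfold pvFc
      rw [hj]
    show pvF arr (j+1) i j = _
    simp only [pvF, if_neg h, e1, e2, e3, hfold]
  · have hr : j - (i+2) = 0 := by omega
    show pvF arr (j+1) i j = _
    simp only [pvF, if_neg h, e1, hr, List.range'_zero, List.foldl_nil,
      hg, false_and, if_false]

-- ---------- matrix (A-side) basics ----------

def pvShape (n : Nat) (dp : List (List Int)) : Prop :=
  dp.length = n ∧ ∀ i : Nat, i < n → (dp.getD i []).length = n

theorem pvShape_set2 {n : Nat} {dp : List (List Int)} (h : pvShape n dp)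
    (i j : Nat) (v : Int) : pvShape n (pvSet2 dp i j v) := by
  obtain ⟨h1, h2⟩ := h
  refine ⟨by simp [pvSet2, h1], ?_⟩
  intro i' hi'
  simp only [pvSet2, List.getD_eq_getElem?_getD, List.getElem?_modify]
  by_cases hii : i = i'
  · subst hii
    have := h2 i hi'
    simp only [List.getD_eq_getElem?_getD] at this
    cases hx : dp[i]? with
    | none => simpa [hx] using this
    | some r => simpa [hx] using this
  · simp only [if_neg hii]
    have := h2 i' hi'
    simpa [List.getD_eq_getElem?_getD] using this

theorem pvGet2_set2_same {n : Nat} {dp : List (List Int)} (hs : pvShape n dp)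
    {i j : Nat} (hi : i < n) (hj : j < n) (v : Int) :
    pvGet2 (pvSet2 dp i j v) i j = v := by
  obtain ⟨h1, h2⟩ := hs
  have hil : i < dp.length := by omega
  have hr : dp[i]? = some dp[i] := List.getElem?_eq_getElem hil
  have hrl : dp[i].length = n := by
    have := h2 i hi
    simp [List.getD_eq_getElem?_getD, hr] at this
    exact this
  simp [pvGet2, pvSet2, List.getD_eq_getElem?_getD, hr,
    List.getElem?_set_self (by omega : j < dp[i].length)]

theorem pvGet2_set2_ne {dp : List (List Int)} {i j i' j' : Nat}
    (h : ¬ (i' = i ∧ j' = j)) (v : Int) :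
    pvGet2 (pvSet2 dp i j v) i' j' = pvGet2 dp i' j' := by
  simp only [pvGet2, pvSet2, List.getD_eq_getElem?_getD, List.getElem?_modify]
  by_cases hii : i = i'
  · subst hii
    have hjj : j ≠ j' := fun hj => h ⟨rfl, hj.symm⟩
    cases hx : dp[i]? with
    | none => simp
    | some r => simp [List.getElem?_set_ne hjj]
  · simp [hii]

theorem pvSet2_set2 (dp : List (List Int)) (i j : Nat) (v w : Int) :
    pvSet2 (pvSet2 dp i j v) i j w = pvSet2 dp i j w := by
  apply List.ext_getElem?
  intro i'
  simp only [pvSet2, List.getElem?_modify]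
  by_cases hii : i = i'
  · subst hii
    cases hx : dp[i]? with
    | none => simp
    | some r => simp [List.set_set]
  · simp [hii]

-- ---------- the port of A, relayered (definitionally equal) ----------

def pvBody (arr : List Int) (i j : Nat) (dp : List (List Int)) : List (List Int) :=
  if i = j then pvSet2 dp i j 1
  else
    let dp := pvSet2 dp i j (1 + pvGet2 dp (i+1) j)
    let dp := if pvGetI arr i = pvGetI arr (i+1) then
        pvSet2 dp i j (min (pvGet2 dp i j) (1 + pvGet2 dp (i+2) j)) else dp
    let dp := if pvGetI arr i = pvGetI arr j ∧ i+1 < j then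
        pvSet2 dp i j (min (pvGet2 dp i j) (pvGet2 dp (i+1) (j-1))) else dp
    (List.range' (i+2) (j - (i+2))).foldl (fun dp k =>
      if pvGetI arr i = pvGetI arr k then
        pvSet2 dp i j (min (pvGet2 dp i j) (pvGet2 dp (i+1) (k-1) + pvGet2 dp (k+1) j))
      else dp) dp

def pvRow (arr : List Int) (n l : Nat) (dp : List (List Int)) (i : Nat) : List (List Int) :=
  (List.range' (i+l-1) (n - (i+l-1))).foldl (fun dp j => pvBody arr i j dp) dp

def pvPass (arr : List Int) (n : Nat) (dp : List (List Int)) (l : Nat) : List (List Int) :=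
  (List.range n).foldl (fun dp i => pvRow arr n l dp i) dp

def pvInit (n : Nat) : List (List Int) :=
  (List.range n).foldl (fun dp _ => dp ++ [List.replicate n (n : Int)]) []

theorem palindromeRemoval_eq (arr : List Int) :
    palindromeRemoval arr =
      pvGet2 ((List.range' 1 arr.length).foldl (pvPass arr arr.length) (pvInit arr.length))
        0 (arr.length - 1) := rfl

theorem pvInit_eq (n : Nat) : pvInit n = List.replicate n (List.replicate n (n : Int)) := by
  unfold pvInit
  rw [PySem.List.foldl_append_singleton_eq_map]
  simp [List.map_const']

-- ---------- A-side invariants ----------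

def pvUT (arr : List Int) (dp : List (List Int)) : Prop :=
  ∀ i j : Nat, j < i → i < arr.length → pvGet2 dp i j = (arr.length : Int)

def pvOK (arr : List Int) (b : Nat) (dp : List (List Int)) : Prop :=
  ∀ i j : Nat, i ≤ j → j < arr.length → j < i + b → pvGet2 dp i j = pvFc arr i j

theorem pvFc_diag (arr : List Int) (i : Nat) : pvFc arr i i = 1 := by
  simp [pvFc, pvF]

-- the k-loop of A's body, on top of a pending write at (i, j), is a pure min-fold
theorem pvKloop (arr : List Int) {n : Nat} {dp : List (List Int)} (hs : pvShape n dp)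
    {i j : Nat} (hi : i < n) (hj : j < n)
    (hsub : ∀ i' j' : Nat, i' ≤ j' → j' < n → j' - i' < j - i → pvGet2 dp i' j' = pvFc arr i' j') :
    ∀ (l : List Nat), (∀ k ∈ l, i + 2 ≤ k ∧ k < j) → ∀ m : Int,
      l.foldl (fun dp k =>
        if pvGetI arr i = pvGetI arr k then
          pvSet2 dp i j (min (pvGet2 dp i j) (pvGet2 dp (i+1) (k-1) + pvGet2 dp (k+1) j))
        else dp) (pvSet2 dp i j m)
      = pvSet2 dp i j (l.foldl (fun b k =>
          if pvGetI arr i = pvGetI arr k then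
            min b (pvFc arr (i+1) (k-1) + pvFc arr (k+1) j) else b) m) := by
  intro l
  induction l with
  | nil => intro _ m; rfl
  | cons k t ih =>
    intro hmem m
    obtain ⟨hk1, hk2⟩ := hmem k (by simp)
    have hrest : ∀ k' ∈ t, i + 2 ≤ k' ∧ k' < j := fun k' hk' => hmem k' (by simp [hk'])
    simp only [List.foldl_cons]
    by_cases hc : pvGetI arr i = pvGetI arr k
    · rw [if_pos hc, if_pos hc,
        pvGet2_set2_same hs hi hj,
        pvGet2_set2_ne (by omega) , pvGet2_set2_ne (by omega),
        hsub (i+1) (k-1) (by omega) (by omega) (by omega),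
        hsub (k+1) j (by omega) (by omega) (by omega),
        pvSet2_set2]
      exact ih hrest _
    · rw [if_neg hc, if_neg hc]
      exact ih hrest m

-- A's body writes the recurrence value into cell (i, j) when all shorter cells are final
theorem pvBody_correct (arr : List Int) (hPre : Pre_palindromeRemoval arr)
    {n : Nat} (hn : n = arr.length) {i j : Nat} (hij : i ≤ j) (hj : j < n)
    {dp : List (List Int)} (hs : pvShape n dp) (hut : pvUT arr dp)
    (hsub : ∀ i' j' : Nat, i' ≤ j' → j' < n → j' - i' < j - i → pvGet2 dp i' j' = pvFc arr i' j') :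
    pvBody arr i j dp = pvSet2 dp i j (pvFc arr i j) := by
  by_cases h : i = j
  · subst h
    simp [pvBody, pvFc_diag]
  · have hij' : i < j := by omega
    have hi : i < n := by omega
    unfold pvBody
    rw [if_neg h]
    simp only []
    rw [hsub (i+1) j (by omega) (by omega) (by omega)]
    set m1 : Int := 1 + pvFc arr (i+1) j with hm1
    -- step 2: the adjacent-pair rule
    have step2 :
        (if pvGetI arr i = pvGetI arr (i+1) then
          pvSet2 (pvSet2 dp i j m1) i j
            (min (pvGet2 (pvSet2 dp i j m1) i j) (1 + pvGet2 (pvSet2 dp i j m1) (i+2) j))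
        else pvSet2 dp i j m1)
        = pvSet2 dp i j (if i+1 < j ∧ pvGetI arr i = pvGetI arr (i+1) then
            min m1 (1 + pvFc arr (i+2) j) else m1) := by
      by_cases hg : i + 1 < j
      · by_cases hc : pvGetI arr i = pvGetI arr (i+1)
        · rw [if_pos hc, if_pos (by exact ⟨hg, hc⟩),
            pvGet2_set2_same hs hi hj,
            pvGet2_set2_ne (by omega),
            hsub (i+2) j (by omega) (by omega) (by omega), pvSet2_set2]
        · rw [if_neg hc, if_neg (by tauto)]
      · -- j = i + 1
        have hji : j = i + 1 := by omega
        by_cases hc : pvGetI arr i = pvGetI arr (i+1)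
        · rw [if_pos hc, if_neg (by tauto)]
          -- the stale read dp[i+2][j]: inside Pre_ it is the untouched value n
          have hn2 : i + 2 < n := by
            rcases Nat.lt_or_ge (i+2) n with h' | h'
            · exact h'
            · exfalso
              have hi2 : i + 2 = n := by omega
              obtain ⟨hne, hPre2⟩ := hPre
              rcases hPre2 with hlt | hne2
              · omega
              · apply hne2
                have : i = arr.length - 2 ∧ j = arr.length - 1 := by omega
                obtain ⟨e1, e2⟩ := this
                rw [← e1, ← e2, hji]
                exact hc
          rw [pvGet2_set2_same hs hi hj, pvGet2_set2_ne (by omega),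
            hut (i+2) j (by omega) (by omega), pvSet2_set2]
          have : m1 = 2 := by rw [hm1, hji, pvFc_diag]; norm_num
          rw [this]
          have habs : min (2 : Int) (1 + (arr.length : Int)) = 2 := by
            have : (1 : Int) ≤ (arr.length : Int) := by
              have : 1 ≤ arr.length := by omega
              exact_mod_cast this
            omega
          rw [habs]
        · rw [if_neg hc, if_neg (by tauto)]
    rw [step2]
    set m2 : Int := (if i+1 < j ∧ pvGetI arr i = pvGetI arr (i+1) then
        min m1 (1 + pvFc arr (i+2) j) else m1) with hm2
    -- step 3: the endpoints rule
    have step3 :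
        (if pvGetI arr i = pvGetI arr j ∧ i+1 < j then
          pvSet2 (pvSet2 dp i j m2) i j
            (min (pvGet2 (pvSet2 dp i j m2) i j) (pvGet2 (pvSet2 dp i j m2) (i+1) (j-1)))
        else pvSet2 dp i j m2)
        = pvSet2 dp i j (if i+1 < j ∧ pvGetI arr i = pvGetI arr j then
            min m2 (pvFc arr (i+1) (j-1)) else m2) := by
      by_cases hc : pvGetI arr i = pvGetI arr j ∧ i+1 < j
      · rw [if_pos hc, if_pos (by tauto),
          pvGet2_set2_same hs hi hj, pvGet2_set2_ne (by omega),
          hsub (i+1) (j-1) (by omega) (by omega) (by omega), pvSet2_set2]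
      · rw [if_neg hc, if_neg (by tauto)]
    rw [step3]
    rw [pvKloop arr hs hi hj hsub (List.range' (i+2) (j - (i+2)))
      (by intro k hk; rw [List.mem_range'_1] at hk; omega)]
    rw [pvFc_eq arr i j hij']

-- A's body only writes cell (i, j), whatever the table holds
theorem pvBody_writes (arr : List Int) (i j : Nat) (dp : List (List Int)) :
    ∃ v : Int, pvBody arr i j dp = pvSet2 dp i j v := by
  by_cases h : i = j
  · exact ⟨1, by simp [pvBody, h]⟩
  · unfold pvBody
    rw [if_neg h]
    simp only []
    set v1 : Int := 1 + pvGet2 dp (i+1) j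
    have collapse : ∀ (m : Int), ∃ v : Int,
        (if pvGetI arr i = pvGetI arr j ∧ i+1 < j then
          pvSet2 (pvSet2 dp i j m) i j
            (min (pvGet2 (pvSet2 dp i j m) i j) (pvGet2 (pvSet2 dp i j m) (i+1) (j-1)))
        else pvSet2 dp i j m) = pvSet2 dp i j v := by
      intro m
      by_cases hc : pvGetI arr i = pvGetI arr j ∧ i+1 < j
      · exact ⟨_, by rw [if_pos hc, pvSet2_set2]⟩
      · exact ⟨m, by rw [if_neg hc]⟩
    have collapse2 : ∀ (m : Int), ∃ v : Int,
        (if pvGetI arr i = pvGetI arr (i+1) then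
          pvSet2 (pvSet2 dp i j m) i j
            (min (pvGet2 (pvSet2 dp i j m) i j) (1 + pvGet2 (pvSet2 dp i j m) (i+2) j))
        else pvSet2 dp i j m) = pvSet2 dp i j v := by
      intro m
      by_cases hc : pvGetI arr i = pvGetI arr (i+1)
      · exact ⟨_, by rw [if_pos hc, pvSet2_set2]⟩
      · exact ⟨m, by rw [if_neg hc]⟩
    obtain ⟨v2, hv2⟩ := collapse2 v1
    rw [hv2]
    obtain ⟨v3, hv3⟩ := collapse v2
    rw [hv3]
    -- the k-loop keeps the pending write shape
    clear hv2 hv3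
    generalize v3 = m
    generalize (List.range' (i+2) (j - (i+2))) = l
    induction l generalizing m with
    | nil => exact ⟨m, rfl⟩
    | cons k t ih =>
      simp only [List.foldl_cons]
      by_cases hc : pvGetI arr i = pvGetI arr k
      · rw [if_pos hc, pvSet2_set2]
        exact ih _
      · rw [if_neg hc]
        exact ih m

-- the rest of a row only rewrites row i at columns > s
theorem pvRow_tail (arr : List Int) {n : Nat} (i s : Nat) :
    ∀ (l : List Nat), (∀ k ∈ l, s + 1 ≤ k) → ∀ (dp : List (List Int)), pvShape n dp →
      pvShape n (l.foldl (fun dp j => pvBody arr i j dp) dp) ∧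
      ∀ i' j' : Nat, (i' ≠ i ∨ j' ≤ s) →
        pvGet2 (l.foldl (fun dp j => pvBody arr i j dp) dp) i' j' = pvGet2 dp i' j' := by
  intro l
  induction l with
  | nil => intro _ dp hs; exact ⟨hs, fun _ _ _ => rfl⟩
  | cons k t ih =>
    intro hmem dp hs
    obtain ⟨v, hv⟩ := pvBody_writes arr i k dp
    simp only [List.foldl_cons, hv]
    have hs' : pvShape n (pvSet2 dp i k v) := pvShape_set2 hs i k v
    obtain ⟨H1, H2⟩ := ih (fun k' h => hmem k' (by simp [h])) _ hs'
    refine ⟨H1, ?_⟩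
    intro i' j' hcond
    have hk := hmem k (by simp)
    rw [H2 i' j' hcond, pvGet2_set2_ne ?_]
    rintro ⟨h1, h2⟩
    rcases hcond with hc | hc
    · exact hc h1
    · omega

theorem pvRow_correct (arr : List Int) (hPre : Pre_palindromeRemoval arr) {n : Nat}
    (hn : n = arr.length) (l i : Nat) (hl : 1 ≤ l) (dp : List (List Int))
    (hs : pvShape n dp) (hut : pvUT arr dp) (hok : pvOK arr (l-1) dp) :
    pvShape n (pvRow arr n l dp i) ∧
    (∀ i' j' : Nat, (i' ≠ i ∨ j' < i+l-1) → pvGet2 (pvRow arr n l dp i) i' j' = pvGet2 dp i' j') ∧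
    (i+l-1 < n → pvGet2 (pvRow arr n l dp i) i (i+l-1) = pvFc arr i (i+l-1)) := by
  unfold pvRow
  cases hc : n - (i+l-1) with
  | zero =>
    simp only [List.range'_zero, List.foldl_nil]
    exact ⟨hs, by intro i' j' h; trivial, fun h => absurd h (by omega)⟩
  | succ c =>
    have hsn : i + l - 1 < n := by omega
    have hib : i < n := by omega
    rw [List.range'_succ]
    simp only [List.foldl_cons]
    have hbody : pvBody arr i (i+l-1) dp = pvSet2 dp i (i+l-1) (pvFc arr i (i+l-1)) :=
      pvBody_correct arr hPre hn (by omega) hsn hs hut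
        (by intro i' j' h1 h2 h3; exact hok i' j' h1 (by omega) (by omega))
    rw [hbody]
    have hs1 := pvShape_set2 hs i (i+l-1) (pvFc arr i (i+l-1))
    obtain ⟨H1, H2⟩ := pvRow_tail arr i (i+l-1) (List.range' (i+l-1+1) c)
      (by intro k hk; rw [List.mem_range'_1] at hk; omega) _ hs1
    refine ⟨H1, ?_, ?_⟩
    · intro i' j' hcond
      rw [H2 i' j' (by rcases hcond with hcc | hcc; exact Or.inl hcc; exact Or.inr (by omega)),
        pvGet2_set2_ne (by rintro ⟨h1, h2⟩; rcases hcond with hcc | hcc; exact hcc h1; omega)]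
    · intro _
      rw [H2 i (i+l-1) (Or.inr le_rfl), pvGet2_set2_same hs hib hsn]

-- a fold over range n carrying an indexed invariant
theorem pvFoldRangeInv {α : Type} (step : α → Nat → α) (P : Nat → α → Prop) :
    ∀ (n : Nat) (a0 : α), (∀ i a, i < n → P i a → P (i+1) (step a i)) → P 0 a0 →
      P n ((List.range n).foldl step a0) := by
  intro n
  induction n with
  | zero => intro a0 _ h0; exact h0
  | succ m ih =>
    intro a0 hstep h0
    rw [List.range_succ, List.foldl_append]
    simp only [List.foldl_cons, List.foldl_nil]
    exact hstep m _ (by omega) (ih a0 (fun i a hi => hstep i a (by omega)) h0)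

-- one full pass of A finalises every cell of length l
theorem pvPass_correct (arr : List Int) (hPre : Pre_palindromeRemoval arr) {n : Nat}
    (hn : n = arr.length) (l : Nat) (hl : 1 ≤ l) (dp : List (List Int))
    (H : pvShape n dp ∧ pvUT arr dp ∧ pvOK arr (l-1) dp) :
    pvShape n (pvPass arr n dp l) ∧ pvUT arr (pvPass arr n dp l) ∧ pvOK arr l (pvPass arr n dp l) := by
  unfold pvPass
  have main := pvFoldRangeInv (fun dp i => pvRow arr n l dp i)
    (fun i0 dp' => pvShape n dp' ∧ pvUT arr dp' ∧ pvOK arr (l-1) dp' ∧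
      ∀ i : Nat, i < i0 → i + l - 1 < n → pvGet2 dp' i (i+l-1) = pvFc arr i (i+l-1))
    n dp ?_ ⟨H.1, H.2.1, H.2.2, fun i hi _ => absurd hi (by omega)⟩
  · obtain ⟨S, U, O, D⟩ := main
    refine ⟨S, U, ?_⟩
    intro i j hij hjn hjb
    by_cases hcase : j < i + (l-1)
    · exact O i j hij hjn hcase
    · have hji : j = i + l - 1 := by omega
      rw [hji]
      exact D i (by omega) (by omega)
  · intro i dp' hi Hq
    obtain ⟨S', U', O', D'⟩ := Hq
    obtain ⟨R1, R2, R3⟩ := pvRow_correct arr hPre hn l i hl dp' S' U' O'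
    refine ⟨R1, ?_, ?_, ?_⟩
    · intro a b hba han
      have hcond : a ≠ i ∨ b < i + l - 1 := by
        rcases eq_or_ne a i with rfl | hai
        · exact Or.inr (by omega)
        · exact Or.inl hai
      rw [R2 a b hcond]
      exact U' a b hba han
    · intro a b hab hbn hbb
      have hcond : a ≠ i ∨ b < i + l - 1 := by
        rcases eq_or_ne a i with rfl | hai
        · exact Or.inr (by omega)
        · exact Or.inl hai
      rw [R2 a b hcond]
      exact O' a b hab hbn hbb
    · intro a ha han
      rcases Nat.lt_or_ge a i with h' | h'
      · rw [R2 a (a+l-1) (Or.inl (by omega))]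
        exact D' a h' han
      · have haa : a = i := by omega
        subst haa
        exact R3 han

theorem pvPasses (arr : List Int) (hPre : Pre_palindromeRemoval arr) {n : Nat}
    (hn : n = arr.length) :
    ∀ (c l0 : Nat) (dp : List (List Int)),
      pvShape n dp ∧ pvUT arr dp ∧ pvOK arr l0 dp →
      pvShape n ((List.range' (l0+1) c).foldl (pvPass arr n) dp) ∧
      pvUT arr ((List.range' (l0+1) c).foldl (pvPass arr n) dp) ∧
      pvOK arr (l0 + c) ((List.range' (l0+1) c).foldl (pvPass arr n) dp) := by
  intro c
  induction c with
  | zero => intro l0 dp H; simpa using H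
  | succ c ih =>
    intro l0 dp H
    rw [List.range'_succ, List.foldl_cons]
    have step := pvPass_correct arr hPre hn (l0+1) (by omega) dp (by simpa using H)
    have := ih (l0+1) _ step
    have he : l0 + 1 + c = l0 + (c+1) := by omega
    rw [he] at this
    exact this

theorem pvInit_inv (arr : List Int) {n : Nat} (hn : n = arr.length) :
    pvShape n (pvInit n) ∧ pvUT arr (pvInit n) ∧ pvOK arr 0 (pvInit n) := by
  rw [pvInit_eq]
  have hget : ∀ i j : Nat, i < n → j < n → pvGet2 (List.replicate n (List.replicate n (n:Int))) i j = (n : Int) := by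
    intro i j hi hj
    simp [pvGet2, List.getD_eq_getElem?_getD, hi, hj]
  refine ⟨⟨by simp, ?_⟩, ?_, ?_⟩
  · intro i hi
    simp [List.getD_eq_getElem?_getD, hi]
  · intro i j hji hin
    rw [hget i j (by omega) (by omega), hn]
  · intro i j hij hjn hb
    omega

theorem palindromeRemoval_value (arr : List Int) (hPre : Pre_palindromeRemoval arr) :
    palindromeRemoval arr = pvFc arr 0 (arr.length - 1) := by
  have hlen : 1 ≤ arr.length := by
    have h1 := hPre.1
    cases arr with
    | nil => exact absurd rfl h1
    | cons a t => simp
  rw [palindromeRemoval_eq]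
  have hM := pvPasses arr hPre rfl arr.length 0 (pvInit arr.length) (pvInit_inv arr rfl)
  simp only [Nat.zero_add] at hM
  exact hM.2.2 0 (arr.length - 1) (by omega) (by omega) (by omega)

-- ---------- B-side: the memo dict is coherent, the recursion returns pvFc ----------

-- every memo entry (at a Nat-pair key) holds the recurrence value of its interval
def pvCoh (arr : List Int) (d : PySem.Dict (Int × Int) Int) : Prop :=
  ∀ (i j : Nat) (v : Int), d.get? ((i : Int), (j : Int)) = some v → v = pvFc arr i j

theorem pvCoh_empty (arr : List Int) : pvCoh arr PySem.Dict.empty := by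
  intro i j v h
  rw [PySem.Dict.get?_empty] at h
  exact absurd h (by simp)

theorem pvCoh_insert (arr : List Int) {d : PySem.Dict (Int × Int) Int} (hd : pvCoh arr d)
    (i j : Nat) {v : Int} (hv : v = pvFc arr i j) :
    pvCoh arr (d.insert ((i : Int), (j : Int)) v) := by
  intro a b w hw
  rw [PySem.Dict.get?_insert] at hw
  by_cases he : ((a : Int), (b : Int)) = ((i : Int), (j : Int))
  · rw [if_pos he] at hw
    rw [Prod.mk.injEq] at he
    have ha : a = i := by exact_mod_cast he.1
    have hb : b = j := by exact_mod_cast he.2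
    subst ha; subst hb
    cases hw
    exact hv
  · rw [if_neg he] at hw
    exact hd a b w hw

theorem pvSolve_correct (arr : List Int) :
    ∀ (f i j : Nat) (d : PySem.Dict (Int × Int) Int), i ≤ j → j - i < f → pvCoh arr d →
      (pvSolve arr f d i j).1 = pvFc arr i j ∧ pvCoh arr (pvSolve arr f d i j).2 := by
  intro f
  induction f with
  | zero => intro i j d _ hf _; omega
  | succ f ih =>
    intro i j d hij hf hd
    by_cases h : i = j
    · subst h
      simp only [pvSolve, if_true]
      exact ⟨(pvFc_diag arr i).symm, hd⟩
    · have hij' : i < j := by omega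
      cases hmem : d.get? ((i : Int), (j : Int)) with
      | some v =>
        simp only [pvSolve, if_neg h, hmem]
        exact ⟨hd i j v hmem, hd⟩
      | none =>
        simp only [pvSolve, if_neg h, hmem]
        obtain ⟨hv1, hd1⟩ := ih (i+1) j d (by omega) (by omega) hd
        set r1 := pvSolve arr f d (i+1) j with hr1
        -- step 2
        have step2 : (if i+1 < j ∧ pvGetI arr i = pvGetI arr (i+1) then
              let s := pvSolve arr f r1.2 (i+2) j
              (min (1 + r1.1) (1 + s.1), s.2)
            else (1 + r1.1, r1.2)).1 =
            (if i+1 < j ∧ pvGetI arr i = pvGetI arr (i+1) then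
              min (1 + pvFc arr (i+1) j) (1 + pvFc arr (i+2) j) else 1 + pvFc arr (i+1) j)
            ∧ pvCoh arr (if i+1 < j ∧ pvGetI arr i = pvGetI arr (i+1) then
              let s := pvSolve arr f r1.2 (i+2) j
              (min (1 + r1.1) (1 + s.1), s.2)
            else (1 + r1.1, r1.2)).2 := by
          by_cases hc : i+1 < j ∧ pvGetI arr i = pvGetI arr (i+1)
          · obtain ⟨hv2, hd2⟩ := ih (i+2) j r1.2 (by omega) (by omega) hd1
            rw [if_pos hc, if_pos hc]
            exact ⟨by simp only [hv1, hv2], hd2⟩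
          · rw [if_neg hc, if_neg hc]
            exact ⟨by rw [hv1], hd1⟩
        set r2 := (if i+1 < j ∧ pvGetI arr i = pvGetI arr (i+1) then
              let s := pvSolve arr f r1.2 (i+2) j
              (min (1 + r1.1) (1 + s.1), s.2)
            else (1 + r1.1, r1.2)) with hr2
        obtain ⟨hv2, hd2⟩ := step2
        -- step 3
        have step3 : (if i+1 < j ∧ pvGetI arr i = pvGetI arr j then
              let s := pvSolve arr f r2.2 (i+1) (j-1)
              (min r2.1 s.1, s.2)
            else r2).1 =
            (if i+1 < j ∧ pvGetI arr i = pvGetI arr j then min r2.1 (pvFc arr (i+1) (j-1)) else r2.1)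
            ∧ pvCoh arr (if i+1 < j ∧ pvGetI arr i = pvGetI arr j then
              let s := pvSolve arr f r2.2 (i+1) (j-1)
              (min r2.1 s.1, s.2)
            else r2).2 := by
          by_cases hc : i+1 < j ∧ pvGetI arr i = pvGetI arr j
          · obtain ⟨hv3, hd3⟩ := ih (i+1) (j-1) r2.2 (by omega) (by omega) hd2
            rw [if_pos hc, if_pos hc]
            exact ⟨by simp only [hv3], hd3⟩
          · rw [if_neg hc, if_neg hc]
            exact ⟨rfl, hd2⟩
        set r3 := (if i+1 < j ∧ pvGetI arr i = pvGetI arr j then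
              let s := pvSolve arr f r2.2 (i+1) (j-1)
              (min r2.1 s.1, s.2)
            else r2) with hr3
        obtain ⟨hv3, hd3⟩ := step3
        -- the k-loop threads the dict; its first component is the pure min-fold
        have hfold : ∀ (l : List Nat), (∀ k ∈ l, i + 2 ≤ k ∧ k < j) →
            ∀ (p : Int × PySem.Dict (Int × Int) Int), pvCoh arr p.2 →
            (l.foldl (fun (p : Int × PySem.Dict (Int × Int) Int) k =>
              if pvGetI arr i = pvGetI arr k then
                let sa := pvSolve arr f p.2 (i+1) (k-1)
                let sb := pvSolve arr f sa.2 (k+1) j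
                (min p.1 (sa.1 + sb.1), sb.2)
              else p) p).1
            = l.foldl (fun b k =>
                if pvGetI arr i = pvGetI arr k then
                  min b (pvFc arr (i+1) (k-1) + pvFc arr (k+1) j) else b) p.1
            ∧ pvCoh arr (l.foldl (fun (p : Int × PySem.Dict (Int × Int) Int) k =>
              if pvGetI arr i = pvGetI arr k then
                let sa := pvSolve arr f p.2 (i+1) (k-1)
                let sb := pvSolve arr f sa.2 (k+1) j
                (min p.1 (sa.1 + sb.1), sb.2)
              else p) p).2 := by
          intro l
          induction l with
          | nil => intro _ p hp; exact ⟨rfl, hp⟩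
          | cons k t iht =>
            intro hmem p hp
            obtain ⟨hk1, hk2⟩ := hmem k (by simp)
            have hrest : ∀ k' ∈ t, i + 2 ≤ k' ∧ k' < j := fun k' hk' => hmem k' (by simp [hk'])
            simp only [List.foldl_cons]
            obtain ⟨hva, hda⟩ := ih (i+1) (k-1) p.2 (by omega) (by omega) hp
            obtain ⟨hvb, hdb⟩ := ih (k+1) j (pvSolve arr f p.2 (i+1) (k-1)).2
              (by omega) (by omega) hda
            by_cases hc : pvGetI arr i = pvGetI arr k
            · have hstep : (if pvGetI arr i = pvGetI arr k then
                  let sa := pvSolve arr f p.2 (i+1) (k-1)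
                  let sb := pvSolve arr f sa.2 (k+1) j
                  (min p.1 (sa.1 + sb.1), sb.2) else p)
                = (min p.1 (pvFc arr (i+1) (k-1) + pvFc arr (k+1) j),
                   (pvSolve arr f (pvSolve arr f p.2 (i+1) (k-1)).2 (k+1) j).2) := by
                rw [if_pos hc]
                simp only [hva, hvb]
              rw [hstep, if_pos hc]
              exact iht hrest _ hdb
            · rw [if_neg hc, if_neg hc]
              exact iht hrest p hp
        obtain ⟨hv4, hd4⟩ := hfold (List.range' (i+2) (j - (i+2)))
          (by intro k hk; rw [List.mem_range'_1] at hk; omega) r3 hd3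
        have h2 : (List.range' (i+2) (j - (i+2))).foldl (fun b k =>
            if pvGetI arr i = pvGetI arr k then
              min b (pvFc arr (i+1) (k-1) + pvFc arr (k+1) j) else b) r3.1 = pvFc arr i j := by
          rw [hv3, hv2, pvFc_eq arr i j hij']
        exact ⟨hv4.trans h2, pvCoh_insert arr hd4 i j (hv4.trans h2)⟩

theorem palindromeRemoval_alt_value (arr : List Int) (hne : arr ≠ []) :
    palindromeRemoval_alt arr = pvFc arr 0 (arr.length - 1) := by
  have hlen : 1 ≤ arr.length := by
    cases arr with
    | nil => exact absurd rfl hne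
    | cons a t => simp
  show (pvSolve arr arr.length PySem.Dict.empty 0 (arr.length - 1)).1 = _
  exact (pvSolve_correct arr arr.length 0 (arr.length - 1) PySem.Dict.empty
    (by omega) (by omega) (pvCoh_empty arr)).1

-- ===== VERDICT (by name: the statement is the Claim_ definition above) =====
theorem palindromeRemoval_spec : Claim_equal_palindromeRemoval := by
  intro arr hDom hPre
  unfold Spec_palindromeRemoval
  rw [palindromeRemoval_value arr hPre, palindromeRemoval_alt_value arr hPre.1]
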